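-- pv_equiv track=rewrite | github.com/IlyasMakari/jelly-analysis | analysis_functions.py | edge_count_in_path
-- ===== SOURCE A (Python) =====
-- def ancestors(element, json_graph):
--     ancestors_list = []
--     if 'parent' not in element:
--         return ancestors_list
--     parent_element_id = element['parent']
--     parent_element = next((e for e in json_graph if e.get('id') == parent_element_id), None)
--     if parent_element:
--         ancestors_list.append(parent_element)
--         ancestors_list.extend(ancestors(parent_element, json_graph))
--     return ancestors_list
--
-- def map_call_elements(json_graph_calls, json_graph):
--   mapped_calls = []
--   for call in json_graph_calls:
--     source_element = next((e for e in json_graph if e.get('id') == call['source']), None)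
--     target_element = next((e for e in json_graph if e.get('id') == call['target']), None)
--     if source_element and target_element:
--       mapped_calls.append({
--           'kind': call['kind'],
--           'source': source_element,
--           'target': target_element
--       })
--   return mapped_calls
--
-- def map_with_ancestors(mapped_calls, json_graph):
--     result = []
--     for call in mapped_calls:
--         source_with_ancestors = [call['source']] + ancestors(call['source'], json_graph)
--         target_with_ancestors = [call['target']] + ancestors(call['target'], json_graph)
--         result.append({
--             'kind': call['kind'],
--             'source': source_with_ancestors,
--             'target': target_with_ancestors
--         })
--     return result
--
-- def edge_count_in_path(json_graph, packages):
--     """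
--     Count the number of edges where the source or target corresponds to a package in the given list of packages,
--     and exclude edges where the source ancestor list contains a package not in the given packages list.
--
--     Parameters:
--         json_graph (list): A list of dictionaries representing the nodes and edges of the graph.
--         packages (list): A list of package names to filter (e.g., ['pkg1@1.0.0', 'pkg2@2.0.0']).
--
--     Returns:
--         int: The count of edges in the path.
--     """
--     # Filter for call elements from the json_graph
--     calls = [node for node in json_graph if node.get("kind") == "call"]
--
--     # Map call elements to their actual elements
--     mapped_calls = map_call_elements(calls, json_graph)
--
--     # Map the calls with ancestors
--     calls_with_ancestors = map_with_ancestors(mapped_calls, json_graph)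
--
--     # Count edges where the source and target meet the criteria
--     edge_count = 0
--     for call in calls_with_ancestors:
--         source_ancestors = call.get("source", [])
--         target_ancestors = call.get("target", [])
--
--         # Check if the source ancestor list only contains packages in the given packages list
--         source_only_in_packages = all(
--             ancestor.get("kind") != "package" or ancestor.get("fullName") in packages
--             for ancestor in source_ancestors
--         )
--
--         # Check if any ancestor in the target is a package in the given packages list
--         target_matches = any(
--             ancestor.get("kind") == "package" and ancestor.get("fullName") in packages
--             for ancestor in target_ancestors
--         )
--
--         # Keep the edge only if the source ancestors are all valid and the target matches
--         if source_only_in_packages and target_matches: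
--             edge_count += 1
--
--     return edge_count
-- ===== SOURCE B (Python) =====
-- def edge_count_in_path(json_graph, packages):
--     # One pass: build an id->element index once, then walk parent chains with
--     # booleans instead of materialising call/ancestor lists.
--     index = {}
--     for e in json_graph:
--         i = e.get('id')
--         if i is not None and i not in index:
--             index[i] = e
--
--     def clean(e):
--         return e.get('kind') != 'package' or e.get('fullName') in packages
--
--     def hit(e):
--         return e.get('kind') == 'package' and e.get('fullName') in packages
--
--     def source_clean(e):
--         while True:
--             if not clean(e):
--                 return False
--             p = e.get('parent')
--             if p is None:
--                 return True
--             nxt = index.get(p)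
--             if nxt is None:
--                 return True
--             e = nxt
--
--     def target_hit(e):
--         while True:
--             if hit(e):
--                 return True
--             p = e.get('parent')
--             if p is None:
--                 return False
--             nxt = index.get(p)
--             if nxt is None:
--                 return False
--             e = nxt
--
--     count = 0
--     for node in json_graph:
--         if node.get('kind') == 'call':
--             s = index.get(node['source'])
--             t = index.get(node['target'])
--             if s is not None and t is not None:
--                 if source_clean(s) and target_hit(t):
--                     count += 1
--     return count
-- ===== Notes on version B (the rewrite author's own statement) =====
-- stated objective: alternative
-- what changed: Replaces the three intermediate list-building stages (filter calls, map to elements, materialise ancestor lists) and the per-lookup linear scans of json_graph with one id->element dict built in a single pass plus a single counting pass that walks each parent chain iteratively accumulating two booleans.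
import Mathlib
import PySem

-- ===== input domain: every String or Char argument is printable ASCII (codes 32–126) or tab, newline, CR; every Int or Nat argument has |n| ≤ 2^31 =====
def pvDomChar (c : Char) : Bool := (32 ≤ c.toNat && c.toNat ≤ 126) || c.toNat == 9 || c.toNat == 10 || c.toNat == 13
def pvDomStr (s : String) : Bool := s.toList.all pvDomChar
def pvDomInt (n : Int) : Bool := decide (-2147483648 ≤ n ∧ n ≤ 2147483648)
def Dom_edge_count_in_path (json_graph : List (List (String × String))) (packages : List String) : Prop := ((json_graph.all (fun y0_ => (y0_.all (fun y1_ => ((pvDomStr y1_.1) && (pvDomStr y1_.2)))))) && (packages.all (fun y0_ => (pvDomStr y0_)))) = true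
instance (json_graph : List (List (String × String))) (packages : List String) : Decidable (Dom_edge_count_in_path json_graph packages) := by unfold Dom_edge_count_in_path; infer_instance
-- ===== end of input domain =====

-- B builds an id->element dict once and walks parent chains accumulating two booleans,
-- replacing A's three intermediate list stages and per-lookup linear scans (objective: alternative).

-- shared primitive: `e.get(k)` on a node dict (duplicate keys: last wins, as in Python's dict(pairs))
def pvGet (e : List (String × String)) (k : String) : Option String :=
  (PySem.Dict.ofList e).get? k

-- the two per-node predicates of the counting loop (identical text in both Pythons);
-- a missing 'fullName' gives None, and None ∈ packages is False (packages holds strings)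
def pvCleanNode (packages : List String) (e : List (String × String)) : Bool :=
  !(pvGet e "kind" == some "package") ||
    (match pvGet e "fullName" with
     | some fn => packages.contains fn
     | none => false)

def pvHitNode (packages : List String) (e : List (String × String)) : Bool :=
  (pvGet e "kind" == some "package") &&
    (match pvGet e "fullName" with
     | some fn => packages.contains fn
     | none => false)

-- ===== PORT A =====
-- next((e for e in json_graph if e.get('id') == i), None)
def pvFindById (g : List (List (String × String))) (i : String) : Option (List (String × String)) :=
  g.find? (fun e => pvGet e "id" == some i)

-- ancestors(element, json_graph); the fuel only makes the recursion total — Python recurses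
-- unboundedly and raises RecursionError on cyclic parent chains (excluded by Pre_)
def pvAncestors (g : List (List (String × String))) : Nat → List (String × String) → List (List (String × String))
  | 0, _ => []
  | f + 1, e =>
    match pvGet e "parent" with
    | none => []
    | some pid =>
      match pvFindById g pid with
      | none => []
      | some p => p :: pvAncestors g f p

-- map_call_elements; Python raises KeyError when a call node lacks 'source'/'target'
-- (excluded by Pre_) — the port skips such a call there
def pvMapCalls (g : List (List (String × String))) : List (List (String × String)) → List (String × List (String × String) × List (String × String))
  | [] => []
  | c :: rest =>
    match pvGet c "source", pvGet c "target" with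
    | some sid, some tid =>
      match pvFindById g sid, pvFindById g tid with
      | some s, some t => ((pvGet c "kind").getD "", s, t) :: pvMapCalls g rest
      | _, _ => pvMapCalls g rest
    | _, _ => pvMapCalls g rest

-- map_with_ancestors
def pvWithAnc (g : List (List (String × String))) (fuel : Nat)
    (calls : List (String × List (String × String) × List (String × String))) :
    List (String × List (List (String × String)) × List (List (String × String))) :=
  calls.map (fun c => (c.1, c.2.1 :: pvAncestors g fuel c.2.1, c.2.2 :: pvAncestors g fuel c.2.2))

def edge_count_in_path (json_graph : List (List (String × String))) (packages : List String) : Int :=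
  let calls := json_graph.filter (fun n => pvGet n "kind" == some "call")
  let mapped := pvMapCalls json_graph calls
  let withAnc := pvWithAnc json_graph (json_graph.length + 1) mapped
  withAnc.foldl
    (fun acc c =>
      if c.2.1.all (pvCleanNode packages) && c.2.2.any (pvHitNode packages) then acc + 1 else acc)
    0

-- ===== PORT B =====
-- the id->element index, built in one pass (first occurrence of an id wins)
def pvIndex (g : List (List (String × String))) : PySem.Dict String (List (String × String)) :=
  g.foldl
    (fun d e =>
      match pvGet e "id" with
      | some i => if d.contains i then d else d.insert i e
      | none => d)
    PySem.Dict.empty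

-- source_clean: iterative walk up the parent chain; the fuel only makes it total
-- (Source B's while loop does not terminate on cyclic chains, excluded by Pre_)
def pvSourceClean (idx : PySem.Dict String (List (String × String))) (packages : List String) : Nat → List (String × String) → Bool
  | 0, e => pvCleanNode packages e
  | f + 1, e =>
    pvCleanNode packages e &&
      (match pvGet e "parent" with
       | none => true
       | some pid =>
         match idx.get? pid with
         | none => true
         | some p => pvSourceClean idx packages f p)

-- target_hit: same walk, dual accumulation
def pvTargetHit (idx : PySem.Dict String (List (String × String))) (packages : List String) : Nat → List (String × String) → Bool
  | 0, e => pvHitNode packages e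
  | f + 1, e =>
    pvHitNode packages e ||
      (match pvGet e "parent" with
       | none => false
       | some pid =>
         match idx.get? pid with
         | none => false
         | some p => pvTargetHit idx packages f p)

def edge_count_in_path_alt (json_graph : List (List (String × String))) (packages : List String) : Int :=
  let idx := pvIndex json_graph
  let fuel := json_graph.length + 1
  json_graph.foldl
    (fun acc n =>
      if pvGet n "kind" == some "call" then
        match pvGet n "source", pvGet n "target" with
        | some sid, some tid =>
          match idx.get? sid, idx.get? tid with
          | some s, some t =>
            if pvSourceClean idx packages fuel s && pvTargetHit idx packages fuel t then acc + 1
            else acc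
          | _, _ => acc
        | _, _ => acc
      else acc)
    0

-- ===== PRECONDITION & SPEC =====
-- the parent chain from e reaches an absent parent key / unknown id within the given fuel
def pvChainEnds (g : List (List (String × String))) : Nat → List (String × String) → Bool
  | 0, _ => false
  | f + 1, e =>
    match pvGet e "parent" with
    | none => true
    | some pid =>
      match pvFindById g pid with
      | none => true
      | some p => pvChainEnds g f p

-- a call node is OK for A: it carries 'source' and 'target' keys (else A raises KeyError), and
-- whenever both endpoints resolve, their parent chains terminate, i.e. end within |graph| steps
-- (else A's `ancestors` raises RecursionError; B's while loop would not terminate there either)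
def pvCallOk (g : List (List (String × String))) (c : List (String × String)) : Bool :=
  match pvGet c "source", pvGet c "target" with
  | some sid, some tid =>
    (match pvFindById g sid, pvFindById g tid with
     | some s, some t =>
       pvChainEnds g (g.length + 1) s && pvChainEnds g (g.length + 1) t
     | _, _ => true)
  | _, _ => false

-- Pre_ = exactly the inputs on which Python A returns normally: every call node is OK as above
def Pre_edge_count_in_path (json_graph : List (List (String × String))) (packages : List String) : Prop :=
  ∀ c ∈ json_graph, pvGet c "kind" = some "call" → pvCallOk json_graph c = true
instance (json_graph : List (List (String × String))) (packages : List String) : Decidable (Pre_edge_count_in_path json_graph packages) := by unfold Pre_edge_count_in_path; infer_instance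

def pvWitness_edge_count_in_path : (List (List (String × String))) × List String :=
  ([[("id", "p"), ("kind", "package"), ("fullName", "pkg")],
    [("id", "f1"), ("parent", "p")],
    [("id", "f2"), ("parent", "p")],
    [("kind", "call"), ("source", "f1"), ("target", "f2")]],
   ["pkg"])

def Spec_edge_count_in_path (json_graph : List (List (String × String))) (packages : List String) (out : Int) : Prop := out = edge_count_in_path_alt json_graph packages
instance (json_graph : List (List (String × String))) (packages : List String) (out : Int) : Decidable (Spec_edge_count_in_path json_graph packages out) := by unfold Spec_edge_count_in_path; infer_instance

-- ===== CLAIM (what is proved, stated in full; the proofs are below) =====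
def Claim_equal_edge_count_in_path : Prop := ∀ (json_graph : List (List (String × String))) (packages : List String), Dom_edge_count_in_path json_graph packages → Pre_edge_count_in_path json_graph packages → Spec_edge_count_in_path json_graph packages (edge_count_in_path json_graph packages)

-- ===== LEMMAS AND PROOFS =====

-- B's one-pass index (first occurrence of an id wins) answers every lookup exactly as
-- A's first-match scan; the generalised accumulator tracks the fold's state
theorem pvIndex_aux (g : List (List (String × String))) (i : String) :
    ∀ d : PySem.Dict String (List (String × String)),
      (g.foldl
        (fun d e =>
          match pvGet e "id" with
          | some i => if d.contains i then d else d.insert i e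
          | none => d) d).get? i
      = ((d.get? i).orElse (fun _ => pvFindById g i)) := by
  induction g with
  | nil => intro d; cases h : d.get? i <;> simp [pvFindById, Option.orElse, h]
  | cons e rest ih =>
    intro d
    simp only [List.foldl_cons]
    rw [ih]
    rcases hid : pvGet e "id" with _ | j
    · have hf : (pvGet e "id" == some i) = false := by simp [hid]
      simp [pvFindById, hf]
    · by_cases hji : j = i
      · subst j
        have hf : (pvGet e "id" == some i) = true := by simp [hid]
        rcases hc : d.contains i with _ | _
        · have hnone : d.get? i = none := by
            rw [PySem.Dict.contains_eq_isSome_get?] at hc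
            cases h : d.get? i <;> simp [h] at hc ⊢
          simp [hid, hc, hnone, PySem.Dict.get?_insert_self, pvFindById, hf, Option.orElse]
        · have hsome : ∃ v, d.get? i = some v := by
            rw [PySem.Dict.contains_eq_isSome_get?] at hc
            cases h : d.get? i <;> simp [h] at hc ⊢
          obtain ⟨v, hv⟩ := hsome
          simp [hid, hc, hv, pvFindById, Option.orElse]
      · have hf : (pvGet e "id" == some i) = false := by simp [hid, hji]
        rcases hc : d.contains j with _ | _
        · simp [hid, hc, PySem.Dict.get?_insert_of_ne d e (fun h => hji h.symm),
                pvFindById, hji]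
        · simp [hid, hc, pvFindById, hji]

theorem pvIndex_get (g : List (List (String × String))) (i : String) :
    (pvIndex g).get? i = pvFindById g i := by
  unfold pvIndex
  rw [pvIndex_aux]
  simp [Option.orElse]

-- walking the chain with a boolean = all/any over A's materialised ancestor list
theorem pvSourceClean_eq (g : List (List (String × String))) (packages : List String) :
    ∀ (f : Nat) (e : List (String × String)),
      pvSourceClean (pvIndex g) packages f e = (e :: pvAncestors g f e).all (pvCleanNode packages) := by
  intro f
  induction f with
  | zero => intro e; simp [pvSourceClean, pvAncestors]
  | succ f ih =>
    intro e
    simp only [pvSourceClean, pvAncestors, pvIndex_get]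
    rcases hp : pvGet e "parent" with _ | pid
    · simp
    · rcases hf : pvFindById g pid with _ | p
      · simp [hf]
      · simp [hf, ih p]

theorem pvTargetHit_eq (g : List (List (String × String))) (packages : List String) :
    ∀ (f : Nat) (e : List (String × String)),
      pvTargetHit (pvIndex g) packages f e = (e :: pvAncestors g f e).any (pvHitNode packages) := by
  intro f
  induction f with
  | zero => intro e; simp [pvTargetHit, pvAncestors]
  | succ f ih =>
    intro e
    simp only [pvTargetHit, pvAncestors, pvIndex_get]
    rcases hp : pvGet e "parent" with _ | pid
    · simp
    · rcases hf : pvFindById g pid with _ | p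
      · simp [hf]
      · simp [hf, ih p]

-- fusing A's map_call_elements + map_with_ancestors + counting fold into one fold over the calls
theorem pvCount_calls (g : List (List (String × String))) (packages : List String) (fuel : Nat) :
    ∀ (calls : List (List (String × String))) (acc : Int),
      (pvWithAnc g fuel (pvMapCalls g calls)).foldl
        (fun acc c =>
          if c.2.1.all (pvCleanNode packages) && c.2.2.any (pvHitNode packages) then acc + 1 else acc)
        acc
      = calls.foldl
        (fun acc c =>
          match pvGet c "source", pvGet c "target" with
          | some sid, some tid =>
            match pvFindById g sid, pvFindById g tid with
            | some s, some t =>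
              if (s :: pvAncestors g fuel s).all (pvCleanNode packages) &&
                 (t :: pvAncestors g fuel t).any (pvHitNode packages) then acc + 1 else acc
            | _, _ => acc
          | _, _ => acc) acc := by
  intro calls
  induction calls with
  | nil => intro acc; simp [pvMapCalls, pvWithAnc]
  | cons c rest ih =>
    intro acc
    simp only [List.foldl_cons]
    rcases hs : pvGet c "source" with _ | sid <;> rcases ht : pvGet c "target" with _ | tid
    · simp only [pvMapCalls, hs]; exact ih acc
    · simp only [pvMapCalls, hs]; exact ih acc
    · simp only [pvMapCalls, hs, ht]; exact ih acc
    · simp only [pvMapCalls, hs, ht]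
      rcases hfs : pvFindById g sid with _ | s <;> rcases hft : pvFindById g tid with _ | t
      · exact ih acc
      · exact ih acc
      · exact ih acc
      · simp only [pvWithAnc, List.map_cons, List.foldl_cons]
        rw [← pvWithAnc]
        exact ih _

-- B's single pass over the graph = a fold over the filtered call nodes
theorem pvFold_filter (step : Int → List (String × String) → Int) :
    ∀ (g : List (List (String × String))) (acc : Int),
      g.foldl (fun acc n => if pvGet n "kind" == some "call" then step acc n else acc) acc
      = (g.filter (fun n => pvGet n "kind" == some "call")).foldl step acc := by
  intro g
  induction g with
  | nil => intro acc; simp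
  | cons n rest ih =>
    intro acc
    rcases h : (pvGet n "kind" == some "call") with _ | _
    · simp only [List.foldl_cons, List.filter_cons, h, Bool.false_eq_true, if_false]
      exact ih acc
    · simp only [List.foldl_cons, List.filter_cons, h, if_true]
      exact ih (step acc n)

-- B's per-call body, named so the folds can be compared as functions
def pvBStep (g : List (List (String × String))) (packages : List String)
    (acc : Int) (n : List (String × String)) : Int :=
  match pvGet n "source", pvGet n "target" with
  | some sid, some tid =>
    match (pvIndex g).get? sid, (pvIndex g).get? tid with
    | some s, some t =>
      if pvSourceClean (pvIndex g) packages (g.length + 1) s &&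
         pvTargetHit (pvIndex g) packages (g.length + 1) t then acc + 1 else acc
    | _, _ => acc
  | _, _ => acc

theorem pvMainEq (json_graph : List (List (String × String))) (packages : List String) :
    edge_count_in_path json_graph packages = edge_count_in_path_alt json_graph packages := by
  have h1 : edge_count_in_path json_graph packages
      = (json_graph.filter (fun n => pvGet n "kind" == some "call")).foldl
          (fun acc c =>
            match pvGet c "source", pvGet c "target" with
            | some sid, some tid =>
              match pvFindById json_graph sid, pvFindById json_graph tid with
              | some s, some t =>
                if (s :: pvAncestors json_graph (json_graph.length + 1) s).all (pvCleanNode packages) &&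
                   (t :: pvAncestors json_graph (json_graph.length + 1) t).any (pvHitNode packages)
                then acc + 1 else acc
              | _, _ => acc
            | _, _ => acc) 0 :=
    pvCount_calls json_graph packages (json_graph.length + 1)
      (json_graph.filter (fun n => pvGet n "kind" == some "call")) 0
  have hstep : pvBStep json_graph packages
      = (fun (acc : Int) (c : List (String × String)) =>
            match pvGet c "source", pvGet c "target" with
            | some sid, some tid =>
              match pvFindById json_graph sid, pvFindById json_graph tid with
              | some s, some t =>
                if (s :: pvAncestors json_graph (json_graph.length + 1) s).all (pvCleanNode packages) &&
                   (t :: pvAncestors json_graph (json_graph.length + 1) t).any (pvHitNode packages)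
                then acc + 1 else acc
              | _, _ => acc
            | _, _ => acc) := by
    funext acc c
    simp only [pvBStep, pvIndex_get, pvSourceClean_eq, pvTargetHit_eq]
  have h3 : edge_count_in_path_alt json_graph packages
      = (json_graph.filter (fun n => pvGet n "kind" == some "call")).foldl
          (pvBStep json_graph packages) 0 :=
    pvFold_filter (pvBStep json_graph packages) json_graph 0
  rw [h1, h3, hstep]

-- ===== VERDICT (by name: the statement is the Claim_ definition above) =====
theorem edge_count_in_path_spec : Claim_equal_edge_count_in_path := by
  intro json_graph packages _ _
  unfold Spec_edge_count_in_path
  exact pvMainEq json_graph packages
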